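-- pv_equiv track=rewrite | github.com/Ashutoshhgupta/Auto-reply-AI-chatbot | main.py | extract_gs_recent_messages
-- ===== SOURCE A (Python) =====
-- def extract_gs_recent_messages(chat_text):
--     lines = chat_text.strip().splitlines()
--     last_ashutosh_index = -1
--
--     for i in reversed(range(len(lines))):
--         if "] Ashutosh:" in lines[i]:
--             last_ashutosh_index = i
--             break
--
--     g_messages = []
--     for line in lines[last_ashutosh_index+1:]:
--         if "] G:" in line:
--             message_part = line.split("] G:", 1)[1].strip()
--             if message_part:
--                 g_messages.append(message_part)
--
--     return "\n".join(g_messages).strip()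
-- ===== SOURCE B (Python) =====
-- def extract_gs_recent_messages(chat_text):
--     g_messages = []
--     for line in chat_text.strip().splitlines():
--         if "] Ashutosh:" in line:
--             g_messages = []
--         elif "] G:" in line:
--             part = line.split("] G:", 1)[1].strip()
--             if part:
--                 g_messages.append(part)
--     return "\n".join(g_messages).strip()
-- ===== Notes on version B (the rewrite author's own statement) =====
-- stated objective: simpler
-- what changed: Replaces A's reverse index scan for the last Ashutosh line plus a slice and a second collecting pass by a single forward pass that resets the collected G-messages at every Ashutosh line.
import Mathlib
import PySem

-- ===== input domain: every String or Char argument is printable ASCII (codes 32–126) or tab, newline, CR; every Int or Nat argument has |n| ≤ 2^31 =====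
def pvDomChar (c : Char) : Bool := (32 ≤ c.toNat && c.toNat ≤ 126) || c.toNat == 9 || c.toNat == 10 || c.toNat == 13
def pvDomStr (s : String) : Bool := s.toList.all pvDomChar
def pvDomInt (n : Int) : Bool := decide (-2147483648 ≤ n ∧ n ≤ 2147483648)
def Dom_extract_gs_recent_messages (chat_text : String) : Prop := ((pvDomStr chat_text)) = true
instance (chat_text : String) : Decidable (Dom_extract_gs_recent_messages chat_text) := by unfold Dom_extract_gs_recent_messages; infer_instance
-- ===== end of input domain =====

-- B replaces A's reverse scan for the last "] Ashutosh:" line + slice + collect pass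
-- by a single forward pass resetting the collected G messages at every Ashutosh line (objective: simpler).

-- shared helper: line.split("] G:", 1)[1].strip() (exact where "] G:" occurs in line)
def pvGPart (line : String) : String :=
  PySem.Str.strip (((PySem.Str.splitMax? line "] G:" 1).getD []).getD 1 "")

-- ===== PORT A =====
-- the 'for i in reversed(range(len(lines))): if "] Ashutosh:" in lines[i]: …; break' loop
def pvLastAshLoop (lines : List String) : List Int → Int
  | [] => -1
  | i :: rest =>
      if PySem.Str.isIn "] Ashutosh:" (PySem.List.pyGetD lines i "") then i
      else pvLastAshLoop lines rest

-- body of A's collecting loop over lines[last_ashutosh_index+1:]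
def pvGStep (gm : List String) (line : String) : List String :=
  if PySem.Str.isIn "] G:" line then
    (if pvGPart line == "" then gm else gm ++ [pvGPart line])
  else gm

def extract_gs_recent_messages (chat_text : String) : String :=
  let lines := PySem.Str.splitlines (PySem.Str.strip chat_text)
  let last := pvLastAshLoop lines (PySem.List.pyRange ((lines.length : Int) - 1) (-1) (-1))
  PySem.Str.strip (PySem.Str.join "\n"
    ((PySem.List.slice lines (some (last + 1)) none).foldl pvGStep []))

-- ===== PORT B =====
-- body of B's single forward pass: reset at Ashutosh lines, otherwise collect G messages
def pvBStep (gm : List String) (line : String) : List String :=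
  if PySem.Str.isIn "] Ashutosh:" line then []
  else if PySem.Str.isIn "] G:" line then
    (if pvGPart line == "" then gm else gm ++ [pvGPart line])
  else gm

def extract_gs_recent_messages_alt (chat_text : String) : String :=
  PySem.Str.strip (PySem.Str.join "\n"
    ((PySem.Str.splitlines (PySem.Str.strip chat_text)).foldl pvBStep []))

-- ===== PRECONDITION & SPEC =====
def Spec_extract_gs_recent_messages (chat_text : String) (out : String) : Prop := out = extract_gs_recent_messages_alt chat_text
instance (chat_text : String) (out : String) : Decidable (Spec_extract_gs_recent_messages chat_text out) := by unfold Spec_extract_gs_recent_messages; infer_instance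

-- ===== CLAIM (what is proved, stated in full; the proofs are below) =====
def Claim_equal_extract_gs_recent_messages : Prop := ∀ (chat_text : String), Dom_extract_gs_recent_messages chat_text → Spec_extract_gs_recent_messages chat_text (extract_gs_recent_messages chat_text)

-- ===== LEMMAS AND PROOFS =====

-- A's last-Ashutosh index over lines xs
def pvLast (xs : List String) : Int :=
  pvLastAshLoop xs (PySem.List.pyRange ((xs.length : Int) - 1) (-1) (-1))

theorem pvLastAshLoop_mem (xs : List String) (idxs : List Int) :
    pvLastAshLoop xs idxs = -1 ∨ pvLastAshLoop xs idxs ∈ idxs := by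
  induction idxs with
  | nil => left; rfl
  | cons i rest ih =>
      simp only [pvLastAshLoop]
      by_cases h : PySem.Str.isIn "] Ashutosh:" (PySem.List.pyGetD xs i "") = true
      · rw [if_pos h]; right; exact List.mem_cons_self
      · rw [if_neg h]
        rcases ih with h1 | h1
        · left; exact h1
        · right; exact List.mem_cons_of_mem _ h1

theorem pvLast_bounds (xs : List String) :
    -1 ≤ pvLast xs ∧ pvLast xs < (xs.length : Int) := by
  rcases pvLastAshLoop_mem xs (PySem.List.pyRange ((xs.length : Int) - 1) (-1) (-1)) with h | h
  · unfold pvLast; rw [h]; omega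
  · rw [PySem.List.mem_pyRange_neg_one] at h
    unfold pvLast; omega

theorem pvLastAshLoop_append (xs : List String) (l : String) (idxs : List Int)
    (hb : ∀ i ∈ idxs, 0 ≤ i ∧ i < (xs.length : Int)) :
    pvLastAshLoop (xs ++ [l]) idxs = pvLastAshLoop xs idxs := by
  induction idxs with
  | nil => rfl
  | cons i rest ih =>
      have hi := hb i (by simp)
      have hget : PySem.List.pyGetD (xs ++ [l]) i "" = PySem.List.pyGetD xs i "" := by
        have h1 : i = ((i.toNat : Nat) : Int) := by omega
        rw [h1, PySem.List.pyGetD_natCast, PySem.List.pyGetD_natCast]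
        have h2 : i.toNat < xs.length := by omega
        simp [List.getD, List.getElem?_append_left h2]
      simp only [pvLastAshLoop, hget]
      split
      · rfl
      · exact ih (fun j hj => hb j (by simp [hj]))

theorem pvLast_append (xs : List String) (l : String) :
    pvLast (xs ++ [l]) =
      if PySem.Str.isIn "] Ashutosh:" l then (xs.length : Int) else pvLast xs := by
  have hlen : (((xs ++ [l]).length : Int)) - 1 = (xs.length : Int) := by simp
  have hcons : PySem.List.pyRange ((xs.length : Int)) (-1) (-1)
      = (xs.length : Int) :: PySem.List.pyRange ((xs.length : Int) - 1) (-1) (-1) :=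
    PySem.List.pyRange_neg_one_cons (by omega)
  have hget : PySem.List.pyGetD (xs ++ [l]) (xs.length : Int) "" = l := by
    rw [PySem.List.pyGetD_natCast]
    simp [List.getD]
  unfold pvLast
  rw [hlen, hcons]
  simp only [pvLastAshLoop, hget]
  by_cases hA : PySem.Str.isIn "] Ashutosh:" l = true
  · rw [if_pos hA, if_pos hA]
  · rw [if_neg hA, if_neg hA]
    exact pvLastAshLoop_append xs l _ (by
      intro i hi
      rw [PySem.List.mem_pyRange_neg_one] at hi
      omega)

-- A's result as a list of messages
def pvAres (xs : List String) : List String :=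
  (PySem.List.slice xs (some (pvLast xs + 1)) none).foldl pvGStep []

theorem pvAres_eq_foldl (xs : List String) :
    xs.foldl pvBStep [] = pvAres xs := by
  induction xs using List.reverseRecOn with
  | nil => rfl
  | append_singleton xs l ih =>
      rw [List.foldl_append, List.foldl_cons, List.foldl_nil, ih]
      unfold pvAres
      rw [pvLast_append]
      by_cases h : PySem.Str.isIn "] Ashutosh:" l = true
      · have hs : PySem.List.slice (xs ++ [l]) (some ((xs.length : Int) + 1)) none = [] := by
          rw [PySem.List.slice_from _ (by omega)]
          apply List.drop_eq_nil_of_le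
          simp
        simp at h
        simp [h, hs, pvBStep]
      · have hb := pvLast_bounds xs
        have h0 : (0:Int) ≤ pvLast xs + 1 := by omega
        have hn : (pvLast xs + 1).toNat ≤ xs.length := by omega
        have hs : PySem.List.slice (xs ++ [l]) (some (pvLast xs + 1)) none
            = PySem.List.slice xs (some (pvLast xs + 1)) none ++ [l] := by
          rw [PySem.List.slice_from _ h0, PySem.List.slice_from _ h0,
              List.drop_append_of_le_length hn]
        simp at h
        simp [h, hs, pvBStep, pvGStep, List.foldl_append]

theorem lists_eq (chat_text : String) :
    extract_gs_recent_messages chat_text = extract_gs_recent_messages_alt chat_text := by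
  unfold extract_gs_recent_messages extract_gs_recent_messages_alt
  rw [pvAres_eq_foldl]
  rfl

-- ===== VERDICT (by name: the statement is the Claim_ definition above) =====
theorem extract_gs_recent_messages_spec : Claim_equal_extract_gs_recent_messages := by
  intro chat_text _
  unfold Spec_extract_gs_recent_messages
  exact lists_eq chat_text
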